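-- pv_equiv track=rewrite | github.com/DanielKuckartz/IJspret | bcd.py | comprimeer
-- ===== SOURCE A (Python) =====
-- def comprimeer (matrix):
-- 	m = len(matrix) # constante
-- 	cumu = [0] # het totaal aantal toegestane velden in de eerste t/m i-de rij
-- 	n = 0 # nu een hulpvariabele
-- 	for rij in matrix:
-- 		for cel in rij:
-- 			if (cel != 0):
-- 				n += 1
-- 		cumu.append(n)
-- 	# n is nu het totale aantal toegestane velden
-- 	hulp = [0] * m # aantal toegestane velden in rij i waarover we straks ge-itereerd hebben
-- 	B = [] # B in Mat(2m, n), maar dan met alle onnodige variabelen eruit gefilterd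
-- 	for rij in range(m):
-- 		B.append( [0] * cumu[rij]
-- 						+ [waarde for waarde in matrix[rij] if waarde != 0]
-- 						+ [0] * ( n - cumu[rij+1] )
-- 						)
-- 	for kol in range(m):
-- 		B.append ( [0]*n ) # de randvoorwaarde voor kolom kol
-- 		for rij in range(m):
-- 			if (matrix[rij][kol] != 0):
-- 				B[ m+kol ][ cumu[rij] + hulp[rij] ] = matrix[rij][kol]
-- 				hulp[rij] += 1
-- 	return B
-- ===== SOURCE B (Python) =====
-- def comprimeer(matrix):
--     m = len(matrix)
--     # one row-major pass: global index table for nonzero cells (None for zeros)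
--     gidx = []
--     g = 0
--     for row in matrix:
--         r = []
--         for cel in row:
--             if cel != 0:
--                 r.append(g)
--                 g += 1
--             else:
--                 r.append(None)
--         gidx.append(r)
--     n = g
--     B = []
--     for i in range(m):
--         row = [0] * n
--         for v, gi in zip(matrix[i], gidx[i]):
--             if v != 0:
--                 row[gi] = v
--         B.append(row)
--     for kol in range(m):
--         row = [0] * n
--         for rij in range(m):
--             v = matrix[rij][kol]
--             if v != 0:
--                 row[gidx[rij][kol]] = v
--         B.append(row)
--     return B
-- ===== Notes on version B (the rewrite author's own statement) =====
-- stated objective: alternative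
-- what changed: B replaces A's cumulative-offset list (cumu) and shared mutable hulp counters by a single global-index table built in one row-major pass, builds each output row locally by scattering nonzero values at their precomputed global indices into a fresh zero row (instead of concatenating zero/value/zero segments and mutating rows of B in place), and appends it.
import Mathlib
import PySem

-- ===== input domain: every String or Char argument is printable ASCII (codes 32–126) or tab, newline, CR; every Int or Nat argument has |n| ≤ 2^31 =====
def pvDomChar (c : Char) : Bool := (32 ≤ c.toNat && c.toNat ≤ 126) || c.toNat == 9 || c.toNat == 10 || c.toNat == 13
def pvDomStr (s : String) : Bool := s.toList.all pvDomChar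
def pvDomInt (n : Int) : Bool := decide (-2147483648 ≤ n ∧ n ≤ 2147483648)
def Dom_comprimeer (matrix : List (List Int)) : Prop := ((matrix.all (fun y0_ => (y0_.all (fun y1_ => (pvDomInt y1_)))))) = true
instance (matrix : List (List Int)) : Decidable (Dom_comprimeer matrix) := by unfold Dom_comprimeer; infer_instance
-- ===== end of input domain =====

-- B replaces A's cumulative-offset list and the shared `hulp` counters by a single
-- global-index table built in one row-major pass, and fills each output row by
-- scattering values into a zero row instead of concatenating zero/value/zero segments
-- (objective: simpler/alternative, same asymptotic cost).

-- ===== PORT A =====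
-- counters are nonnegative Python ints, ported as Nat; element access matrix[rij][kol]
-- is ported with getD (in range for every input admitted by Pre_comprimeer)
def comprimeer (matrix : List (List Int)) : List (List Int) :=
  let m := matrix.length
  let cn := matrix.foldl
      (fun (p : List Nat × Nat) rij =>
        let n := rij.foldl (fun n cel => if cel ≠ 0 then n + 1 else n) p.2
        (p.1 ++ [n], n))
      ([0], 0)
  let cumu := cn.1
  let n := cn.2
  let hulp := List.replicate m (0 : Nat)
  let B : List (List Int) := (List.range m).foldl
      (fun B rij =>
        B ++ [ List.replicate (cumu.getD rij 0) (0 : Int)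
               ++ (matrix.getD rij []).filter (fun waarde => waarde ≠ 0)
               ++ List.replicate (n - cumu.getD (rij + 1) 0) (0 : Int) ])
      []
  let fin := (List.range m).foldl
      (fun (st : List (List Int) × List Nat) kol =>
        let st1 := (st.1 ++ [List.replicate n (0 : Int)], st.2)
        (List.range m).foldl
          (fun (st : List (List Int) × List Nat) rij =>
            if (matrix.getD rij []).getD kol 0 ≠ 0 then
              ( st.1.set (m + kol)
                  ((st.1.getD (m + kol) []).set
                    (cumu.getD rij 0 + st.2.getD rij 0)
                    ((matrix.getD rij []).getD kol 0)),
                st.2.set rij (st.2.getD rij 0 + 1) )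
            else st)
          st1)
      (B, hulp)
  fin.1

-- ===== PORT B =====
def comprimeer_alt (matrix : List (List Int)) : List (List Int) :=
  let m := matrix.length
  let gp := matrix.foldl
      (fun (p : List (List (Option Nat)) × Nat) row =>
        let r := row.foldl
            (fun (q : List (Option Nat) × Nat) cel =>
              if cel ≠ 0 then (q.1 ++ [some q.2], q.2 + 1)
              else (q.1 ++ [none], q.2))
            ([], p.2)
        (p.1 ++ [r.1], r.2))
      ([], 0)
  let gidx := gp.1
  let n := gp.2
  let rowBlock := (List.range m).map (fun i =>
      ((matrix.getD i []).zip (gidx.getD i [])).foldl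
        (fun row vg => if vg.1 ≠ 0 then row.set (vg.2.getD 0) vg.1 else row)
        (List.replicate n (0 : Int)))
  let colBlock := (List.range m).map (fun kol =>
      (List.range m).foldl
        (fun row rij =>
          if (matrix.getD rij []).getD kol 0 ≠ 0 then
            row.set (((gidx.getD rij []).getD kol none).getD 0)
              ((matrix.getD rij []).getD kol 0)
          else row)
        (List.replicate n (0 : Int)))
  rowBlock ++ colBlock

-- ===== PRECONDITION & SPEC =====
-- Python A raises IndexError (matrix[rij][kol], kol < len(matrix)) iff some row is
-- shorter than the number of rows; Pre_ admits exactly the inputs where A returns.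
def Pre_comprimeer (matrix : List (List Int)) : Prop :=
  ∀ r ∈ matrix, matrix.length ≤ r.length
instance (matrix : List (List Int)) : Decidable (Pre_comprimeer matrix) := by unfold Pre_comprimeer; infer_instance
def pvWitness_comprimeer : List (List Int) := [[1, 0, 2], [0, 3, 0], [4, 0, 5]]
def Spec_comprimeer (matrix : List (List Int)) (out : List (List Int)) : Prop := out = comprimeer_alt matrix
instance (matrix : List (List Int)) (out : List (List Int)) : Decidable (Spec_comprimeer matrix out) := by unfold Spec_comprimeer; infer_instance

-- ===== CLAIM (what is proved, stated in full; the proofs are below) =====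
def Claim_equal_comprimeer : Prop := ∀ (matrix : List (List Int)), Dom_comprimeer matrix → Pre_comprimeer matrix → Spec_comprimeer matrix (comprimeer matrix)

-- ===== LEMMAS AND PROOFS =====

def pvCnt (l : List Int) : Nat := (l.filter (fun cel => cel ≠ 0)).length
def pvCsum (mat : List (List Int)) : Nat := (mat.map pvCnt).sum
def pvPcnt (l : List Int) (k : Nat) : Nat := pvCnt (l.take k)

def pvF : List Int → Nat → List Int → List Int
  | [], _, acc => acc
  | c :: t, s, acc => if c ≠ 0 then pvF t (s + 1) (acc.set s c) else pvF t s acc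

def pvCumuRec (s : Nat) : List (List Int) → List Nat
  | [] => []
  | r :: t => (s + pvCnt r) :: pvCumuRec (s + pvCnt r) t

def pvGRow (s : Nat) : List Int → List (Option Nat)
  | [] => []
  | c :: t => if c ≠ 0 then some s :: pvGRow (s + 1) t else none :: pvGRow s t

def pvGOut (s : Nat) : List (List Int) → List (List (Option Nat))
  | [] => []
  | r :: t => pvGRow s r :: pvGOut (s + pvCnt r) t

def pvV (matrix : List (List Int)) (kol rij : Nat) : Int := (matrix.getD rij []).getD kol 0

def pvCanonStep (matrix : List (List Int)) (kol : Nat) (row : List Int) (rij : Nat) : List Int :=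
  if pvV matrix kol rij ≠ 0 then
    row.set (pvCsum (matrix.take rij) + pvPcnt (matrix.getD rij []) kol) (pvV matrix kol rij)
  else row

def pvUpd (matrix : List (List Int)) (kol : Nat) (h : List Nat) (rij : Nat) : List Nat :=
  if pvV matrix kol rij ≠ 0 then h.set rij (h.getD rij 0 + 1) else h

def pvRow (matrix : List (List Int)) (n i : Nat) : List Int :=
  pvF (matrix.getD i []) (pvCsum (matrix.take i)) (List.replicate n 0)

-- phase 1
theorem pvCnt_fold (l : List Int) : ∀ (s : Nat),
    l.foldl (fun n cel => if cel ≠ 0 then n + 1 else n) s = s + pvCnt l := by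
  induction l with
  | nil => simp [pvCnt]
  | cons c t ih =>
    intro s
    rw [List.foldl_cons, ih]
    by_cases h : c ≠ 0 <;> simp [pvCnt, List.filter_cons, h] <;> omega

theorem pvCumu_fold (mat : List (List Int)) : ∀ (init : List Nat × Nat),
    mat.foldl
      (fun (p : List Nat × Nat) rij =>
        (p.1 ++ [rij.foldl (fun n cel => if cel ≠ 0 then n + 1 else n) p.2],
         rij.foldl (fun n cel => if cel ≠ 0 then n + 1 else n) p.2))
      init
    = (init.1 ++ pvCumuRec init.2 mat, init.2 + pvCsum mat) := by
  induction mat with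
  | nil => intro init; simp [pvCumuRec, pvCsum]
  | cons r t ih =>
    intro init
    rw [List.foldl_cons, ih]
    simp only [pvCnt_fold, pvCumuRec, pvCsum, List.map_cons, List.sum_cons, Prod.mk.injEq]
    exact ⟨by simp, by omega⟩

theorem pvGRow_fold (l : List Int) : ∀ (init : List (Option Nat) × Nat),
    l.foldl
      (fun (q : List (Option Nat) × Nat) cel =>
        if cel ≠ 0 then (q.1 ++ [some q.2], q.2 + 1) else (q.1 ++ [none], q.2))
      init
    = (init.1 ++ pvGRow init.2 l, init.2 + pvCnt l) := by
  induction l with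
  | nil => intro init; simp [pvGRow, pvCnt]
  | cons c t ih =>
    intro init
    rw [List.foldl_cons, ih]
    by_cases h : c ≠ 0 <;>
      simp [pvGRow, h, pvCnt, List.filter_cons, Prod.mk.injEq] <;> omega

theorem pvGOut_fold (mat : List (List Int)) : ∀ (init : List (List (Option Nat)) × Nat),
    mat.foldl
      (fun (p : List (List (Option Nat)) × Nat) row =>
        (p.1 ++ [(row.foldl
            (fun (q : List (Option Nat) × Nat) cel =>
              if cel ≠ 0 then (q.1 ++ [some q.2], q.2 + 1)
              else (q.1 ++ [none], q.2))
            ([], p.2)).1],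
         (row.foldl
            (fun (q : List (Option Nat) × Nat) cel =>
              if cel ≠ 0 then (q.1 ++ [some q.2], q.2 + 1)
              else (q.1 ++ [none], q.2))
            ([], p.2)).2))
      init
    = (init.1 ++ pvGOut init.2 mat, init.2 + pvCsum mat) := by
  induction mat with
  | nil => intro init; simp [pvGOut, pvCsum]
  | cons r t ih =>
    intro init
    rw [List.foldl_cons, ih]
    simp only [pvGRow_fold, pvGOut, pvCsum, List.map_cons, List.sum_cons, Prod.mk.injEq]
    exact ⟨by simp, by omega⟩

theorem pvFoldl_append_map {α β : Type} (L : List α) (f : α → β) : ∀ (acc : List β),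
    L.foldl (fun B i => B ++ [f i]) acc = acc ++ L.map f := by
  induction L with
  | nil => simp
  | cons a t ih => intro acc; simp [ih]

-- phase 2
theorem pvCnt_append (x y : List Int) : pvCnt (x ++ y) = pvCnt x + pvCnt y := by
  simp [pvCnt, List.filter_append]

theorem pvCsum_take_succ (mat : List (List Int)) : ∀ i, i < mat.length →
    pvCsum (mat.take (i + 1)) = pvCsum (mat.take i) + pvCnt (mat.getD i []) := by
  induction mat with
  | nil => simp
  | cons r t ih =>
    intro i hi
    cases i with
    | zero => simp [pvCsum]
    | succ j =>
      simp only [List.take_succ_cons, pvCsum, List.map_cons, List.sum_cons, List.getD_cons_succ]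
      have := ih j (by simpa using hi)
      simp only [pvCsum] at this
      omega

theorem pvCsum_take_le (mat : List (List Int)) (k : Nat) : pvCsum (mat.take k) ≤ pvCsum mat := by
  unfold pvCsum
  conv_rhs => rw [← List.take_append_drop k mat]
  rw [List.map_append, List.sum_append, List.map_take]
  omega

theorem pvCumuRec_getD (mat : List (List Int)) : ∀ (s i : Nat), i < mat.length →
    (pvCumuRec s mat).getD i 0 = s + pvCsum (mat.take (i + 1)) := by
  induction mat with
  | nil => simp
  | cons r t ih =>
    intro s i hi
    cases i with
    | zero => simp [pvCumuRec, pvCsum]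
    | succ j =>
      simp only [pvCumuRec, List.getD_cons_succ]
      rw [ih _ j (by simpa using hi)]
      simp only [List.take_succ_cons, pvCsum, List.map_cons, List.sum_cons]
      omega

theorem pvCumu_getD (mat : List (List Int)) : ∀ i, i ≤ mat.length →
    ((0 :: pvCumuRec 0 mat) : List Nat).getD i 0 = pvCsum (mat.take i) := by
  intro i hi
  cases i with
  | zero => simp [pvCsum]
  | succ j =>
    simp only [List.getD_cons_succ]
    rw [pvCumuRec_getD mat 0 j (by omega)]
    omega

theorem pvGOut_getD (mat : List (List Int)) : ∀ (s i : Nat), i < mat.length →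
    (pvGOut s mat).getD i [] = pvGRow (s + pvCsum (mat.take i)) (mat.getD i []) := by
  induction mat with
  | nil => simp
  | cons r t ih =>
    intro s i hi
    cases i with
    | zero => simp [pvGOut, pvCsum]
    | succ j =>
      simp only [pvGOut, List.getD_cons_succ]
      rw [ih _ j (by simpa using hi)]
      simp only [List.take_succ_cons, pvCsum, List.map_cons, List.sum_cons]
      congr 1
      omega

theorem pvGRow_getD (l : List Int) : ∀ (s j : Nat), j < l.length →
    (pvGRow s l).getD j none
      = if l.getD j 0 ≠ 0 then some (s + pvPcnt l j) else none := by
  induction l with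
  | nil => simp
  | cons c t ih =>
    intro s j hj
    cases j with
    | zero =>
      by_cases h : c ≠ 0
      · simp [pvGRow, h, pvPcnt, pvCnt]
      · simp [pvGRow, h, pvPcnt, pvCnt]
    | succ k =>
      have hk : k < t.length := by simpa using hj
      by_cases h : c ≠ 0
      · rw [show pvGRow s (c :: t) = some s :: pvGRow (s + 1) t by simp [pvGRow, h]]
        rw [List.getD_cons_succ, ih _ k hk, List.getD_cons_succ]
        have hp : pvPcnt (c :: t) (k + 1) = pvPcnt t k + 1 := by
          simp [pvPcnt, pvCnt, List.filter_cons, h]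
        rw [hp]
        split <;> simp <;> omega
      · rw [show pvGRow s (c :: t) = none :: pvGRow s t by simp [pvGRow, h]]
        rw [List.getD_cons_succ, ih _ k hk, List.getD_cons_succ]
        have hp : pvPcnt (c :: t) (k + 1) = pvPcnt t k := by
          simp only [ne_eq, not_not] at h
          simp [pvPcnt, pvCnt, List.filter_cons, h]
        rw [hp]

theorem pvGetD_ne_imp_lt (l : List Int) (j : Nat) (h : l.getD j 0 ≠ 0) : j < l.length := by
  by_contra hc
  push_neg at hc
  rw [List.getD_eq_getElem?_getD, List.getElem?_eq_none (by omega)] at h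
  simp at h

-- phase 3: scatter
theorem pvSet_take_succ (acc : List Int) (s : Nat) (c : Int) (hs : s < acc.length) :
    (acc.set s c).take (s + 1) = acc.take s ++ [c] := by
  rw [List.set_eq_take_append_cons_drop, if_pos hs]
  rw [List.take_append]
  simp [List.length_take, Nat.min_eq_left (Nat.le_of_lt hs)]

theorem pvSet_drop (acc : List Int) (s k : Nat) (c : Int) (hk : s < k) :
    (acc.set s c).drop k = acc.drop k := by
  apply List.ext_getElem?
  intro n
  rw [List.getElem?_drop, List.getElem?_drop, List.getElem?_set_ne (by omega)]

theorem pvF_scatter (l : List Int) : ∀ (s : Nat) (acc : List Int), s + pvCnt l ≤ acc.length →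
    pvF l s acc = acc.take s ++ l.filter (fun cel => cel ≠ 0) ++ acc.drop (s + pvCnt l) := by
  induction l with
  | nil =>
    intro s acc h
    simp only [pvF, List.filter_nil, pvCnt, List.filter_nil, List.length_nil] at *
    simp [List.take_append_drop]
  | cons c t ih =>
    intro s acc h
    by_cases hc : c ≠ 0
    · have hcnt : pvCnt (c :: t) = pvCnt t + 1 := by simp [pvCnt, List.filter_cons, hc]
      have hs : s < acc.length := by omega
      simp only [pvF, hc, ite_true, if_true]
      rw [ih (s + 1) (acc.set s c) (by rw [List.length_set]; omega)]
      rw [pvSet_drop acc s (s + 1 + pvCnt t) c (by omega)]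
      rw [pvSet_take_succ acc s c hs]
      rw [show s + 1 + pvCnt t = s + pvCnt (c :: t) by omega]
      simp [List.filter_cons, hc]
    · have hc' : c = 0 := by simpa using hc
      have hcnt : pvCnt (c :: t) = pvCnt t := by simp [pvCnt, List.filter_cons, hc']
      simp only [pvF, hc, ite_false, if_false]
      rw [ih s acc (by omega)]
      simp [List.filter_cons, hc', hcnt]
      rw [hc'] at hcnt
      omega

theorem pvZip_scatter (l : List Int) : ∀ (s : Nat) (acc : List Int),
    (l.zip (pvGRow s l)).foldl
      (fun row vg => if vg.1 ≠ 0 then row.set (vg.2.getD 0) vg.1 else row) acc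
    = pvF l s acc := by
  induction l with
  | nil => intro s acc; simp [pvF]
  | cons c t ih =>
    intro s acc
    by_cases h : c ≠ 0
    · rw [show pvGRow s (c :: t) = some s :: pvGRow (s + 1) t from by simp [pvGRow, h]]
      simp only [List.zip_cons_cons, List.foldl_cons, ih, Option.getD_some]
      rw [if_pos h]
      simp [pvF, h]
    · rw [show pvGRow s (c :: t) = none :: pvGRow s t from by simp [pvGRow, h]]
      simp only [List.zip_cons_cons, List.foldl_cons, ih]
      rw [if_neg h]
      simp [pvF, h]

-- phase 4: hulp counters
theorem pvUpd_fold_length (matrix : List (List Int)) (kol : Nat) :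
    ∀ (rs : List Nat) (h : List Nat), (rs.foldl (pvUpd matrix kol) h).length = h.length := by
  intro rs
  induction rs with
  | nil => intro h; rfl
  | cons a t ih =>
    intro h
    rw [List.foldl_cons, ih]
    unfold pvUpd
    split <;> simp

theorem pvUpd_fold_getD_notmem (matrix : List (List Int)) (kol : Nat) :
    ∀ (rs : List Nat) (h : List Nat) (i : Nat), i ∉ rs →
      (rs.foldl (pvUpd matrix kol) h).getD i 0 = h.getD i 0 := by
  intro rs
  induction rs with
  | nil => intro h i _; rfl
  | cons a t ih =>
    intro h i hi
    rw [List.foldl_cons, ih _ i (fun hm => hi (List.mem_cons_of_mem a hm))]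
    unfold pvUpd
    split
    · rw [List.getD_eq_getElem?_getD, List.getElem?_set_ne (by intro he; exact hi (he ▸ List.mem_cons_self)),
        ← List.getD_eq_getElem?_getD]
    · rfl

theorem pvUpd_fold_getD (matrix : List (List Int)) (kol : Nat) :
    ∀ (rs : List Nat) (h : List Nat), rs.Nodup → (∀ j ∈ rs, j < h.length) →
      ∀ i ∈ rs, (rs.foldl (pvUpd matrix kol) h).getD i 0
        = h.getD i 0 + (if (matrix.getD i []).getD kol 0 ≠ 0 then 1 else 0) := by
  intro rs
  induction rs with
  | nil => intro h _ _ i hi; cases hi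
  | cons a t ih =>
    intro h hnd hlen i hi
    have hat : a ∉ t := (List.nodup_cons.mp hnd).1
    rw [List.foldl_cons]
    rcases List.mem_cons.mp hi with rfl | hit
    · rw [pvUpd_fold_getD_notmem matrix kol t _ i hat]
      unfold pvUpd pvV
      have hlt : i < h.length := hlen i (List.mem_cons_self)
      split
      · rw [List.getD_eq_getElem?_getD, List.getElem?_set_self (by simpa using hlt)]
        simp
      · simp_all
    · have hia : i ≠ a := fun he => hat (he ▸ hit)
      rw [ih (pvUpd matrix kol h a) (List.nodup_cons.mp hnd).2
          (fun j hj => by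
            have : (pvUpd matrix kol h a).length = h.length := by unfold pvUpd; split <;> simp
            rw [this]; exact hlen j (List.mem_cons_of_mem a hj)) i hit]
      have : (pvUpd matrix kol h a).getD i 0 = h.getD i 0 := by
        unfold pvUpd
        split
        · rw [List.getD_eq_getElem?_getD, List.getElem?_set_ne (fun he => hia he.symm),
            ← List.getD_eq_getElem?_getD]
        · rfl
      rw [this]

theorem pvPcnt_succ (l : List Int) (k : Nat) :
    pvPcnt l (k + 1) = pvPcnt l k + (if l.getD k 0 ≠ 0 then 1 else 0) := by
  rcases Nat.lt_or_ge k l.length with hk | hk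
  · unfold pvPcnt
    rw [List.take_add_one, pvCnt_append, List.getElem?_eq_getElem hk]
    rw [List.getD_eq_getElem?_getD, List.getElem?_eq_getElem hk]
    simp only [Option.toList_some, Option.getD_some]
    congr 1
    by_cases h : l[k] ≠ 0 <;> simp [pvCnt, List.filter_cons, h]
  · rw [List.getD_eq_getElem?_getD, List.getElem?_eq_none (by omega)]
    unfold pvPcnt
    rw [List.take_of_length_le (by omega), List.take_of_length_le (by omega)]
    simp

-- phase 5: the column block of port A
theorem pvInnerA (matrix : List (List Int)) (kol : Nat) (cumu : List Nat) :
    ∀ (rs : List Nat), rs.Nodup →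
      (∀ i ∈ rs, i < matrix.length) →
      (∀ i ∈ rs, cumu.getD i 0 = pvCsum (matrix.take i)) →
      ∀ (L : List (List Int)) (r : List Int) (h : List Nat),
      (∀ i ∈ rs, h.getD i 0 = pvPcnt (matrix.getD i []) kol) →
      (∀ i ∈ rs, i < h.length) →
      L.length = matrix.length + kol →
      rs.foldl
        (fun (st : List (List Int) × List Nat) rij =>
          if (matrix.getD rij []).getD kol 0 ≠ 0 then
            ( st.1.set (matrix.length + kol)
                ((st.1.getD (matrix.length + kol) []).set
                  (cumu.getD rij 0 + st.2.getD rij 0)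
                  ((matrix.getD rij []).getD kol 0)),
              st.2.set rij (st.2.getD rij 0 + 1) )
          else st)
        (L ++ [r], h)
      = (L ++ [rs.foldl (pvCanonStep matrix kol) r], rs.foldl (pvUpd matrix kol) h) := by
  intro rs
  induction rs with
  | nil => intros; simp
  | cons a t ih =>
    intro hnd hmem hcumu L r h hh hlen hL
    have hat : a ∉ t := (List.nodup_cons.mp hnd).1
    rw [List.foldl_cons, List.foldl_cons, List.foldl_cons]
    by_cases hv : (matrix.getD a []).getD kol 0 ≠ 0
    · rw [if_pos hv]
      have hget : (L ++ [r]).getD (matrix.length + kol) [] = r := by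
        rw [← hL, List.getD_append_right _ _ _ _ (le_refl _)]
        simp
      have hset : ∀ x : List Int, (L ++ [r]).set (matrix.length + kol) x = L ++ [x] := by
        intro x
        rw [← hL, List.set_append_right _ _ (le_refl _)]
        simp
      rw [hget, hset]
      have hpos : cumu.getD a 0 + h.getD a 0
          = pvCsum (matrix.take a) + pvPcnt (matrix.getD a []) kol := by
        rw [hcumu a (List.mem_cons_self), hh a (List.mem_cons_self)]
      rw [hpos]
      have hcan : pvCanonStep matrix kol r a
          = r.set (pvCsum (matrix.take a) + pvPcnt (matrix.getD a []) kol)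
              ((matrix.getD a []).getD kol 0) := by
        unfold pvCanonStep pvV
        rw [if_pos hv]
      have hupd : pvUpd matrix kol h a = h.set a (h.getD a 0 + 1) := by
        unfold pvUpd pvV
        rw [if_pos hv]
      rw [hcan, hupd]
      refine ih (List.nodup_cons.mp hnd).2
        (fun i hi => hmem i (List.mem_cons_of_mem a hi))
        (fun i hi => hcumu i (List.mem_cons_of_mem a hi))
        L _ _
        (fun i hi => by
          have hia : i ≠ a := fun he => hat (he ▸ hi)
          rw [List.getD_eq_getElem?_getD, List.getElem?_set_ne (fun he => hia he.symm),
            ← List.getD_eq_getElem?_getD]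
          exact hh i (List.mem_cons_of_mem a hi))
        (fun i hi => by
          rw [List.length_set]
          exact hlen i (List.mem_cons_of_mem a hi))
        hL
    · rw [if_neg hv]
      have hcan : pvCanonStep matrix kol r a = r := by
        unfold pvCanonStep pvV
        rw [if_neg hv]
      have hupd : pvUpd matrix kol h a = h := by
        unfold pvUpd pvV
        rw [if_neg hv]
      rw [hcan, hupd]
      exact ih (List.nodup_cons.mp hnd).2
        (fun i hi => hmem i (List.mem_cons_of_mem a hi))
        (fun i hi => hcumu i (List.mem_cons_of_mem a hi))
        L r h
        (fun i hi => hh i (List.mem_cons_of_mem a hi))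
        (fun i hi => hlen i (List.mem_cons_of_mem a hi))
        hL

theorem pvColA (matrix : List (List Int)) (n : Nat) (cumu : List Nat)
    (hcumu : ∀ i, i < matrix.length → cumu.getD i 0 = pvCsum (matrix.take i)) :
    ∀ (b k : Nat) (L : List (List Int)) (h : List Nat),
      L.length = matrix.length + k →
      matrix.length ≤ h.length →
      (∀ i, i < matrix.length → h.getD i 0 = pvPcnt (matrix.getD i []) k) →
      ((List.range' k b).foldl
        (fun (st : List (List Int) × List Nat) kol =>
          (List.range matrix.length).foldl
            (fun (st : List (List Int) × List Nat) rij =>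
              if (matrix.getD rij []).getD kol 0 ≠ 0 then
                ( st.1.set (matrix.length + kol)
                    ((st.1.getD (matrix.length + kol) []).set
                      (cumu.getD rij 0 + st.2.getD rij 0)
                      ((matrix.getD rij []).getD kol 0)),
                  st.2.set rij (st.2.getD rij 0 + 1) )
              else st)
            (st.1 ++ [List.replicate n (0 : Int)], st.2))
        (L, h)).1
      = L ++ (List.range' k b).map (fun kol =>
          (List.range matrix.length).foldl (pvCanonStep matrix kol) (List.replicate n 0)) := by
  intro b
  induction b with
  | zero => intro k L h _ _ _; simp
  | succ b ih =>
    intro k L h hL hh_len hinv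
    rw [List.range'_succ, List.foldl_cons]
    rw [pvInnerA matrix k cumu (List.range matrix.length) List.nodup_range
        (fun i hi => List.mem_range.mp hi)
        (fun i hi => hcumu i (List.mem_range.mp hi))
        L (List.replicate n 0) h
        (fun i hi => hinv i (List.mem_range.mp hi))
        (fun i hi => lt_of_lt_of_le (List.mem_range.mp hi) hh_len)
        hL]
    rw [ih (k + 1) _ _
        (by simp [hL]; omega)
        (by rw [pvUpd_fold_length]; exact hh_len)
        (fun i hi => by
          rw [pvUpd_fold_getD matrix k (List.range matrix.length) h List.nodup_range
              (fun j hj => lt_of_lt_of_le (List.mem_range.mp hj) hh_len)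
              i (List.mem_range.mpr hi)]
          rw [hinv i hi, pvPcnt_succ])]
    simp

-- phase 6: block lemmas
theorem pvRowA (matrix : List (List Int)) (i : Nat) (hi : i < matrix.length) :
    List.replicate (((0 :: pvCumuRec 0 matrix) : List Nat).getD i 0) (0 : Int)
      ++ (matrix.getD i []).filter (fun waarde => waarde ≠ 0)
      ++ List.replicate (pvCsum matrix - ((0 :: pvCumuRec 0 matrix) : List Nat).getD (i + 1) 0) (0 : Int)
    = pvRow matrix (pvCsum matrix) i := by
  rw [pvCumu_getD matrix i (le_of_lt hi), pvCumu_getD matrix (i + 1) (by omega)]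
  unfold pvRow
  have hb : pvCsum (matrix.take i) + pvCnt (matrix.getD i []) ≤ pvCsum matrix := by
    rw [← pvCsum_take_succ matrix i hi]
    exact pvCsum_take_le matrix (i + 1)
  rw [pvF_scatter _ _ _ (by simpa using hb)]
  rw [List.take_replicate, List.drop_replicate]
  rw [Nat.min_eq_left (le_trans (Nat.le_add_right _ _) hb)]
  rw [pvCsum_take_succ matrix i hi]

theorem pvRowB (matrix : List (List Int)) (i : Nat) (hi : i < matrix.length) :
    ((matrix.getD i []).zip ((pvGOut 0 matrix).getD i [])).foldl
      (fun row vg => if vg.1 ≠ 0 then row.set (vg.2.getD 0) vg.1 else row)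
      (List.replicate (pvCsum matrix) 0)
    = pvRow matrix (pvCsum matrix) i := by
  rw [pvGOut_getD matrix 0 i hi, Nat.zero_add, pvZip_scatter]
  rfl

theorem pvColB (matrix : List (List Int)) (kol : Nat) :
    (List.range matrix.length).foldl
      (fun row rij =>
        if (matrix.getD rij []).getD kol 0 ≠ 0 then
          row.set ((((pvGOut 0 matrix).getD rij []).getD kol none).getD 0)
            ((matrix.getD rij []).getD kol 0)
        else row)
      (List.replicate (pvCsum matrix) 0)
    = (List.range matrix.length).foldl (pvCanonStep matrix kol)
        (List.replicate (pvCsum matrix) 0) := by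
  apply PySem.List.foldl_congr_mem
  intro acc rij hrij
  have hr : rij < matrix.length := List.mem_range.mp hrij
  by_cases hv : (matrix.getD rij []).getD kol 0 ≠ 0
  · rw [if_pos hv]
    have hkl : kol < (matrix.getD rij []).length := pvGetD_ne_imp_lt _ _ hv
    rw [pvGOut_getD matrix 0 rij hr, Nat.zero_add, pvGRow_getD _ _ _ hkl, if_pos hv]
    unfold pvCanonStep pvV
    rw [if_pos hv]
    rfl
  · rw [if_neg hv]
    unfold pvCanonStep pvV
    rw [if_neg hv]



theorem pvMain (matrix : List (List Int)) : comprimeer matrix = comprimeer_alt matrix := by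
  unfold comprimeer comprimeer_alt
  simp only [pvCumu_fold, pvGOut_fold, List.nil_append, List.singleton_append, Nat.zero_add,
    pvFoldl_append_map]
  have hcol := pvColA matrix (pvCsum matrix) (0 :: pvCumuRec 0 matrix)
      (fun i hi => pvCumu_getD matrix i (le_of_lt hi)) matrix.length 0
      ((List.range matrix.length).map (fun rij =>
        List.replicate (((0 :: pvCumuRec 0 matrix) : List Nat).getD rij 0) (0 : Int)
          ++ (matrix.getD rij []).filter (fun waarde => waarde ≠ 0)
          ++ List.replicate (pvCsum matrix - ((0 :: pvCumuRec 0 matrix) : List Nat).getD (rij + 1) 0) (0 : Int)))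
      (List.replicate matrix.length 0)
      (by simp)
      (by simp)
      (fun i hi => by simp [pvPcnt, pvCnt])
  rw [← List.range_eq_range'] at hcol
  rw [hcol]
  congr 1
  · apply List.map_congr_left
    intro i hi
    rw [pvRowA matrix i (List.mem_range.mp hi), ← pvRowB matrix i (List.mem_range.mp hi)]
  · apply List.map_congr_left
    intro kol _
    rw [← pvColB matrix kol]


-- ===== VERDICT (by name: the statement is the Claim_ definition above) =====
theorem comprimeer_spec : Claim_equal_comprimeer := by
  unfold Claim_equal_comprimeer Spec_comprimeer
  intro matrix _ _
  exact pvMain matrix
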